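-- pv_equiv track=rewrite | github.com/StjerneIdioten/advent-of-code | 2023/day13/main.py | find_mirror_in_rows
-- ===== SOURCE A (Python) =====
-- from itertools import (pairwise)
--
-- def find_mirror_in_rows(pattern, previous_value=None):
--     for row_idx,pair in enumerate(pairwise(pattern)):
--         if (pair[0] == pair[1]):
--             lower = row_idx - 1
--             upper = row_idx + 2
--             equal = True
--             while lower >= 0 and upper <= len(pattern) - 1:
--                 if pattern[upper] != pattern[lower]:
--                     equal = False
--                     break
--                 lower -= 1
--                 upper += 1
--             if equal:
--                 if previous_value is None or previous_value != row_idx + 1: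
--                     return row_idx + 1
--     return 0
-- ===== SOURCE B (Python) =====
-- def find_mirror_in_rows(pattern, previous_value=None):
--     rev = []
--     suffix = list(pattern)
--     for k in range(1, len(pattern)):
--         rev.insert(0, suffix.pop(0))
--         if all(a == b for a, b in zip(rev, suffix)) and previous_value != k:
--             return k
--     return 0
-- ===== Notes on version B (the rewrite author's own statement) =====
-- stated objective: alternative
-- what changed: Replaced pairwise-scan with index-arithmetic expansion around each equal adjacent pair by a single structural scan over split points that maintains the reversed prefix and the suffix as lists and tests the mirror with one zip/all prefix comparison (no indices, no inner while).
import Mathlib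
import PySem

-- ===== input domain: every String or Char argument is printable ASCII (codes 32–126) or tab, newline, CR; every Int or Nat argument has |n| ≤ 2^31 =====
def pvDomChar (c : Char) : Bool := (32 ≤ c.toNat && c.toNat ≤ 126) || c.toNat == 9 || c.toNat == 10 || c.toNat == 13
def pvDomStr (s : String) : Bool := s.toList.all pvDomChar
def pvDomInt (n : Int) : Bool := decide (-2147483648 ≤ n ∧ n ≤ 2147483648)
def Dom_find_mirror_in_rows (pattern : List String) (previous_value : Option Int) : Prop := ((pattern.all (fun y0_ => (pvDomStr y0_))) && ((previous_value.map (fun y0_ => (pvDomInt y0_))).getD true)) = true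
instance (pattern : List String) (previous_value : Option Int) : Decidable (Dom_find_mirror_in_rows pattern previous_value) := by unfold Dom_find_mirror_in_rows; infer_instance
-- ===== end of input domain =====

-- B changes the algorithmic decomposition (list-structural split-point scan instead of
-- pairwise + index expansion); same results, similar cost ("alternative").

-- ===== PORT A =====
-- the inner `while lower >= 0 and upper <= len(pattern)-1` loop; `upper` strictly
-- increases, so fuel = pattern.length (the value A's caller passes) is never exhausted.
def aExpand (pattern : List String) (lower upper : Int) (fuel : Nat) : Bool :=
  match fuel with
  | 0 => true
  | f + 1 =>
    if lower ≥ 0 ∧ upper ≤ (pattern.length : Int) - 1 then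
      if PySem.List.pyGet? pattern upper ≠ PySem.List.pyGet? pattern lower then false
      else aExpand pattern (lower - 1) (upper + 1) f
    else true

-- the `for row_idx, pair in enumerate(pairwise(pattern))` loop
def aLoop (pattern : List String) (previous_value : Option Int)
    (pairs : List (String × String)) (row_idx : Int) : Int :=
  match pairs with
  | [] => 0
  | (p0, p1) :: rest =>
    if p0 == p1 then
      if aExpand pattern (row_idx - 1) (row_idx + 2) pattern.length then
        if previous_value = none ∨ previous_value ≠ some (row_idx + 1) then row_idx + 1
        else aLoop pattern previous_value rest (row_idx + 1)
      else aLoop pattern previous_value rest (row_idx + 1)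
    else aLoop pattern previous_value rest (row_idx + 1)

def find_mirror_in_rows (pattern : List String) (previous_value : Option Int) : Int :=
  aLoop pattern previous_value (pattern.zip pattern.tail) 0

-- ===== PORT B =====
-- `all(a == b for a, b in zip(xs, ys))`
def allEqZip : List String → List String → Bool
  | a :: as, b :: bs => (a == b) && allEqZip as bs
  | _, _ => true

-- the `for k in range(1, len(pattern))` loop; rev/suffix are Source B's two lists
def bLoop (previous_value : Option Int) (rev suffix : List String) (k : Int) : Int :=
  match suffix with
  | [] => 0
  | [_] => 0
  | r :: r' :: rest =>
    if allEqZip (r :: rev) (r' :: rest) ∧ previous_value ≠ some k then k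
    else bLoop previous_value (r :: rev) (r' :: rest) (k + 1)

def find_mirror_in_rows_alt (pattern : List String) (previous_value : Option Int) : Int :=
  bLoop previous_value [] pattern 1

-- ===== PRECONDITION & SPEC =====
def Spec_find_mirror_in_rows (pattern : List String) (previous_value : Option Int) (out : Int) : Prop := out = find_mirror_in_rows_alt pattern previous_value
instance (pattern : List String) (previous_value : Option Int) (out : Int) : Decidable (Spec_find_mirror_in_rows pattern previous_value out) := by unfold Spec_find_mirror_in_rows; infer_instance

-- ===== CLAIM (what is proved, stated in full; the proofs are below) =====
def Claim_equal_find_mirror_in_rows : Prop := ∀ (pattern : List String) (previous_value : Option Int), Dom_find_mirror_in_rows pattern previous_value → Spec_find_mirror_in_rows pattern previous_value (find_mirror_in_rows pattern previous_value)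

-- ===== LEMMAS AND PROOFS =====

-- A's expansion loop on pattern = u.reverse ++ mid ++ v, started with lower pointing at
-- the last element of u.reverse and upper at the head of v, computes allEqZip u v.
theorem aExpand_eq_allEqZip : ∀ (fuel : Nat) (u mid v : List String),
    min u.length v.length ≤ fuel →
    aExpand (u.reverse ++ mid ++ v) ((u.length : Int) - 1) ((u.length : Int) + mid.length) fuel
      = allEqZip u v := by
  intro fuel
  induction fuel with
  | zero =>
    intro u mid v h
    rcases u with _ | ⟨a, u'⟩
    · simp [aExpand, allEqZip]
    · rcases v with _ | ⟨b, v'⟩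
      · simp [aExpand, allEqZip]
      · simp at h
  | succ f ih =>
    intro u mid v _h
    rcases u with _ | ⟨a, u'⟩
    · -- lower = -1 : loop does not run
      simp [aExpand, allEqZip]
    · rcases v with _ | ⟨b, v'⟩
      · -- upper = len(pattern) : loop does not run
        have hcond : ¬ ((((a :: u').length : Int) - 1 ≥ 0) ∧
            ((a :: u').length : Int) + (mid.length : Int) ≤
              (((a :: u').reverse ++ mid ++ ([] : List String)).length : Int) - 1) := by
          simp only [List.length_append, List.length_reverse, List.length_nil,
            List.length_cons, not_and]
          intro _; push_cast; omega
        rw [aExpand, if_neg hcond]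
        rfl
      · -- both sides nonempty: one comparison, then recurse
        have hcond : ((((a :: u').length : Int) - 1 ≥ 0) ∧
            ((a :: u').length : Int) + (mid.length : Int) ≤
              (((a :: u').reverse ++ mid ++ b :: v').length : Int) - 1) := by
          simp only [List.length_append, List.length_reverse, List.length_cons]
          push_cast
          omega
        have hup : PySem.List.pyGet? ((a :: u').reverse ++ mid ++ b :: v')
            (((a :: u').length : Int) + (mid.length : Int)) = some b := by
          have e1 : (a :: u').reverse ++ mid ++ b :: v' =
              ((a :: u').reverse ++ mid) ++ b :: v' := by simp
          have e2 : (((a :: u').length : Int) + (mid.length : Int)) =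
              (((a :: u').reverse ++ mid).length : Int) := by
            simp only [List.length_append, List.length_reverse]; push_cast; ring
          rw [e1, e2, PySem.List.pyGet?_append_length]
        have hlo : PySem.List.pyGet? ((a :: u').reverse ++ mid ++ b :: v')
            (((a :: u').length : Int) - 1) = some a := by
          have e1 : (a :: u').reverse ++ mid ++ b :: v' =
              u'.reverse ++ a :: (mid ++ b :: v') := by simp
          have e2 : (((a :: u').length : Int) - 1) = ((u'.reverse.length : Int)) := by
            simp only [List.length_reverse, List.length_cons]; push_cast; ring
          rw [e1, e2, PySem.List.pyGet?_append_length]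
        rw [aExpand, if_pos hcond, hup, hlo]
        by_cases hab : a = b
        · subst hab
          rw [if_neg (by simp)]
          have e1 : (a :: u').reverse ++ mid ++ a :: v' =
              u'.reverse ++ (a :: (mid ++ [a])) ++ v' := by simp
          have e2 : (((a :: u').length : Int) - 1 - 1) = ((u'.length : Int) - 1) := by
            simp only [List.length_cons]; push_cast; ring
          have e3 : (((a :: u').length : Int) + (mid.length : Int) + 1) =
              ((u'.length : Int) + (((a :: (mid ++ [a])) : List String).length : Int)) := by
            simp only [List.length_cons, List.length_append, List.length_nil]
            push_cast; ring
          rw [e1, e2, e3, ih u' _ v' (by simp only [List.length_cons] at _h ⊢; omega)]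
          simp [allEqZip]
        · have hne : some b ≠ some a := by simp [Ne.symm hab]
          rw [if_pos hne]
          simp [allEqZip, hab]

-- previous_value test: A's `is None or != k` equals B's plain `!= k`
theorem pvCond_iff (pv : Option Int) (k : Int) :
    (pv = none ∨ pv ≠ some k) ↔ pv ≠ some k := by
  cases pv <;> simp

-- the two outer loops agree at every split point
theorem loop_agree (pv : Option Int) : ∀ (suf pre : List String),
    aLoop (pre.reverse ++ suf) pv (suf.zip suf.tail) (pre.length : Int)
      = bLoop pv pre suf ((pre.length : Int) + 1) := by
  intro suf
  induction suf with
  | nil => intro pre; simp [aLoop, bLoop]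
  | cons r suf' ih =>
    intro pre
    rcases suf' with _ | ⟨r', rest⟩
    · simp [aLoop, bLoop]
    · have hzip : ((r :: r' :: rest).zip (r :: r' :: rest).tail) =
          (r, r') :: ((r' :: rest).zip (r' :: rest).tail) := by simp
      rw [hzip]
      have hrec : aLoop (pre.reverse ++ r :: r' :: rest) pv
            ((r' :: rest).zip (r' :: rest).tail) ((pre.length : Int) + 1)
          = bLoop pv (r :: pre) (r' :: rest) ((pre.length : Int) + 1 + 1) := by
        have := ih (r :: pre)
        have e : (r :: pre).reverse ++ r' :: rest = pre.reverse ++ r :: r' :: rest := by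
          simp
        rw [e] at this
        have e2 : (((r :: pre).length : Int)) = (pre.length : Int) + 1 := by
          simp
        rw [e2] at this
        exact this
      have hexp : aExpand (pre.reverse ++ r :: r' :: rest) ((pre.length : Int) - 1)
            ((pre.length : Int) + 2) (pre.reverse ++ r :: r' :: rest).length
          = allEqZip pre rest := by
        have e1 : pre.reverse ++ r :: r' :: rest =
            pre.reverse ++ ([r, r'] : List String) ++ rest := by simp
        have e2 : ((pre.length : Int) + 2) =
            ((pre.length : Int) + (([r, r'] : List String).length : Int)) := by simp
        rw [e1, e2, aExpand_eq_allEqZip _ pre [r, r'] rest (by simp)]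
      show aLoop _ _ _ _ = _
      rw [aLoop, bLoop]
      by_cases hrr : r = r'
      · have hbeq : (r == r') = true := by simp [hrr]
        rw [if_pos hbeq, hexp]
        have hz : allEqZip (r :: pre) (r' :: rest) = ((r == r') && allEqZip pre rest) := by
          simp [allEqZip]
        by_cases hall : allEqZip pre rest = true
        · rw [if_pos hall]
          by_cases hpv : pv ≠ some ((pre.length : Int) + 1)
          · rw [if_pos ((pvCond_iff pv _).mpr hpv),
              if_pos (by rw [hz, hbeq, hall]; exact ⟨rfl, hpv⟩)]
          · rw [if_neg (by rw [pvCond_iff]; exact hpv),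
              if_neg (by rw [hz]; tauto), hrec]
        · rw [if_neg hall, if_neg (by rw [hz]; simp [hall]), hrec]
      · have hbeq : ¬ ((r == r') = true) := by simp [hrr]
        rw [if_neg hbeq,
          if_neg (by rw [show allEqZip (r :: pre) (r' :: rest) = ((r == r') && allEqZip pre rest) from by simp [allEqZip]]; simp [hrr]),
          hrec]

-- ===== VERDICT (by name: the statement is the Claim_ definition above) =====
theorem find_mirror_in_rows_spec : Claim_equal_find_mirror_in_rows := by
  intro pattern pv _
  unfold Spec_find_mirror_in_rows find_mirror_in_rows find_mirror_in_rows_alt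
  have := loop_agree pv pattern []
  simpa using this
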